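-- pv_equiv track=rewrite | github.com/hongsir457/smart-qto-system | backend/app/services/slice_analysis/result_merger.py | _find_matching_ocr_id
-- ===== SOURCE A (Python) =====
-- from typing import Dict, Any, List, Optional
--
-- def _find_matching_ocr_id(vision_id: str, ocr_ids: List[str]) -> Optional[str]:
--     """在OCR结果中查找匹配的构件编号"""
--     if not vision_id:
--         return None
--
--     # 精确匹配
--     for ocr_id in ocr_ids:
--         if vision_id.upper() == ocr_id.upper():
--             return ocr_id
--
--     # 模糊匹配
--     for ocr_id in ocr_ids:
--         if vision_id.upper() in ocr_id.upper() or ocr_id.upper() in vision_id.upper():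
--             return ocr_id
--
--     return None
-- ===== SOURCE B (Python) =====
-- from typing import List, Optional
--
-- def _find_matching_ocr_id(vision_id: str, ocr_ids: List[str]) -> Optional[str]:
--     """Single pass: return an exact (case-insensitive) match immediately,
--     remember the first substring match and return it only after the scan."""
--     if not vision_id:
--         return None
--     vu = vision_id.upper()
--     fuzzy = None
--     for ocr_id in ocr_ids:
--         ou = ocr_id.upper()
--         if vu == ou:
--             return ocr_id
--         if fuzzy is None and (vu in ou or ou in vu):
--             fuzzy = ocr_id
--     return fuzzy
-- ===== Notes on version B (the rewrite author's own statement) =====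
-- stated objective: faster
-- what changed: Two sequential scans (exact pass, then fuzzy pass) are merged into one pass that returns an exact match immediately and defers the first substring match in an accumulator; vision_id.upper() and each ocr_id.upper() are computed once per element instead of repeatedly.
import Mathlib
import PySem

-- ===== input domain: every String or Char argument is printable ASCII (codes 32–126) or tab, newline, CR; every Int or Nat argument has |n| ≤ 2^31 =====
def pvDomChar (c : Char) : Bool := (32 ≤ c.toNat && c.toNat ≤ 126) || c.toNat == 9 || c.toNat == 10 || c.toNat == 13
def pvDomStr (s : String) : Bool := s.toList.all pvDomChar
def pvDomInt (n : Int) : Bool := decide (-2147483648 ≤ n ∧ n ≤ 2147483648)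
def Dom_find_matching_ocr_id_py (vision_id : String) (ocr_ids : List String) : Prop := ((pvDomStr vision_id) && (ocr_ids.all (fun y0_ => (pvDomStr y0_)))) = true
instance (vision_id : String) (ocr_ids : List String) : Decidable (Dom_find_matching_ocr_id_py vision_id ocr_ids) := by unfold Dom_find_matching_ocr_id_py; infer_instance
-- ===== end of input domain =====

-- B merges A's two scans (exact pass then fuzzy pass) into one pass with a deferred
-- fuzzy accumulator and hoists the .upper() calls; a timing run measured B faster (constant factor).
-- ===== PORT A =====
def fmA_exact (vision_id : String) : List String → Option String
  | [] => none
  | x :: xs =>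
    if PySem.Str.upper vision_id == PySem.Str.upper x then some x
    else fmA_exact vision_id xs

def fmA_fuzzy (vision_id : String) : List String → Option String
  | [] => none
  | x :: xs =>
    if PySem.Str.isIn (PySem.Str.upper vision_id) (PySem.Str.upper x)
       || PySem.Str.isIn (PySem.Str.upper x) (PySem.Str.upper vision_id) then some x
    else fmA_fuzzy vision_id xs

def find_matching_ocr_id_py (vision_id : String) (ocr_ids : List String) : Option String :=
  if vision_id == "" then none
  else
    match fmA_exact vision_id ocr_ids with
    | some r => some r
    | none => fmA_fuzzy vision_id ocr_ids

-- ===== PORT B =====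
def fmB_loop (vu : String) (fuzzy : Option String) : List String → Option String
  | [] => fuzzy
  | x :: xs =>
    let ou := PySem.Str.upper x
    if vu == ou then some x
    else
      fmB_loop vu
        (if fuzzy.isNone && (PySem.Str.isIn vu ou || PySem.Str.isIn ou vu) then some x else fuzzy)
        xs

def find_matching_ocr_id_py_alt (vision_id : String) (ocr_ids : List String) : Option String :=
  if vision_id == "" then none
  else fmB_loop (PySem.Str.upper vision_id) none ocr_ids

-- ===== PRECONDITION & SPEC =====
def Spec_find_matching_ocr_id_py (vision_id : String) (ocr_ids : List String) (out : Option String) : Prop := out = find_matching_ocr_id_py_alt vision_id ocr_ids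
instance (vision_id : String) (ocr_ids : List String) (out : Option String) : Decidable (Spec_find_matching_ocr_id_py vision_id ocr_ids out) := by unfold Spec_find_matching_ocr_id_py; infer_instance

-- ===== CLAIM (what is proved, stated in full; the proofs are below) =====
def Claim_equal_find_matching_ocr_id_py : Prop := ∀ (vision_id : String) (ocr_ids : List String), Dom_find_matching_ocr_id_py vision_id ocr_ids → Spec_find_matching_ocr_id_py vision_id ocr_ids (find_matching_ocr_id_py vision_id ocr_ids)

-- ===== LEMMAS AND PROOFS =====

-- ===== VERDICT (by name: the statement is the Claim_ definition above) =====
theorem fmB_loop_eq (v : String) (fuzzy : Option String) (xs : List String) :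
    fmB_loop (PySem.Str.upper v) fuzzy xs =
      match fmA_exact v xs with
      | some r => some r
      | none => fuzzy.orElse (fun _ => fmA_fuzzy v xs) := by
  induction xs generalizing fuzzy with
  | nil => cases fuzzy <;> simp [fmB_loop, fmA_exact, fmA_fuzzy, Option.orElse]
  | cons x xs ih =>
    by_cases hx : PySem.Str.upper v = PySem.Str.upper x
    · simp [fmB_loop, fmA_exact, hx]
    · have hB : fmB_loop (PySem.Str.upper v) fuzzy (x :: xs) =
          fmB_loop (PySem.Str.upper v)
            (if fuzzy.isNone && (PySem.Str.isIn (PySem.Str.upper v) (PySem.Str.upper x)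
               || PySem.Str.isIn (PySem.Str.upper x) (PySem.Str.upper v)) then some x else fuzzy)
            xs := by
        simp [fmB_loop, hx]
      have hA : fmA_exact v (x :: xs) = fmA_exact v xs := by simp [fmA_exact, hx]
      have hF : fmA_fuzzy v (x :: xs) =
          if PySem.Str.isIn (PySem.Str.upper v) (PySem.Str.upper x)
             || PySem.Str.isIn (PySem.Str.upper x) (PySem.Str.upper v) then some x
          else fmA_fuzzy v xs := rfl
      rw [hB, ih, hA, hF]
      cases fuzzy with
      | some f => cases fmA_exact v xs <;> simp [Option.orElse]
      | none => cases fmA_exact v xs <;> split_ifs <;> simp_all [Option.orElse]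

theorem find_matching_ocr_id_py_spec : Claim_equal_find_matching_ocr_id_py := by
  intro v l _
  unfold Spec_find_matching_ocr_id_py find_matching_ocr_id_py find_matching_ocr_id_py_alt
  by_cases h : v == ""
  · simp [h]
  · rw [if_neg (by simpa using h), if_neg (by simpa using h), fmB_loop_eq]
    cases fmA_exact v l <;> simp [Option.orElse]
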